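-- pv_equiv track=rewrite | github.com/rhddnjs1974/Backjoon | 16~20platinum/2xxxx/23291.py | second_stack
-- ===== SOURCE A (Python) =====
-- def second_stack(arr):
--     n = len(arr)
--     half = n//2
--     quarter = n//4
--
--     cols = []
--     for i in range(half):
--         cols.append([arr[half+i], arr[half-1-i]])
--
--     res = []
--     for i in range(quarter):
--         col = cols[quarter+i][:]
--         t = cols[quarter-1-i]
--         for j in range(len(t)-1, -1, -1):
--             col.append(t[j])
--         res.append(col)
--     return res
-- ===== SOURCE B (Python) =====
-- def second_stack(arr):
--     n = len(arr)
--     h = n // 2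
--     q = n // 4
--     return [[arr[h+q+i], arr[h-1-q-i], arr[h-q+i], arr[h+q-1-i]]
--             for i in range(q)]
-- ===== Notes on version B (the rewrite author's own statement) =====
-- stated objective: simpler
-- what changed: Drops the intermediate cols table and its first loop; each output row is built directly from four index expressions in a single comprehension over range(n//4).
import Mathlib
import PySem

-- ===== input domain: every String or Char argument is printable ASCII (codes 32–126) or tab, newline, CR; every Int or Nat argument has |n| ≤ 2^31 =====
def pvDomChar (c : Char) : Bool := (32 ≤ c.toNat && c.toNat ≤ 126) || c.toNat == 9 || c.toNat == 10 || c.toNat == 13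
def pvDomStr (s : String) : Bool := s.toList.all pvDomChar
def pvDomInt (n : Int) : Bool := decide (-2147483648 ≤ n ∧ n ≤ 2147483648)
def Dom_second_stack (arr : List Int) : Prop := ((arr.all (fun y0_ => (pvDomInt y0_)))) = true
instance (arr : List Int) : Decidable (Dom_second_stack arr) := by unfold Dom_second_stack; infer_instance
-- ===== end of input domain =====

-- B drops A's intermediate `cols` table and its first loop: each output row is built
-- directly from four index expressions in one pass over range(n//4) (objective: simpler).

-- ===== PORT A =====
-- arr[k] is ported as pyGetD arr k 0: every index A forms is provably in range
-- (0 ≤ k < len(arr)), so the default is never used and the port is exact.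
def second_stack (arr : List Int) : List (List Int) :=
  let n : Int := arr.length
  let half := PySem.Int.floordiv n 2
  let quarter := PySem.Int.floordiv n 4
  let cols := (PySem.List.pyRange 0 half 1).foldl
    (fun cols i =>
      cols ++ [[PySem.List.pyGetD arr (half + i) 0, PySem.List.pyGetD arr (half - 1 - i) 0]]) []
  (PySem.List.pyRange 0 quarter 1).foldl
    (fun res i =>
      let col := PySem.List.slice (PySem.List.pyGetD cols (quarter + i) []) none none
      let t := PySem.List.pyGetD cols (quarter - 1 - i) []
      let col := (PySem.List.pyRange ((t.length : Int) - 1) (-1) (-1)).foldl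
        (fun col j => col ++ [PySem.List.pyGetD t j 0]) col
      res ++ [col]) []

-- ===== PORT B =====
def second_stack_alt (arr : List Int) : List (List Int) :=
  let n : Int := arr.length
  let h := PySem.Int.floordiv n 2
  let q := PySem.Int.floordiv n 4
  (PySem.List.pyRange 0 q 1).map
    (fun i =>
      [PySem.List.pyGetD arr (h + q + i) 0, PySem.List.pyGetD arr (h - 1 - q - i) 0,
       PySem.List.pyGetD arr (h - q + i) 0, PySem.List.pyGetD arr (h + q - 1 - i) 0])

-- ===== PRECONDITION & SPEC =====
def Spec_second_stack (arr : List Int) (out : List (List Int)) : Prop := out = second_stack_alt arr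
instance (arr : List Int) (out : List (List Int)) : Decidable (Spec_second_stack arr out) := by unfold Spec_second_stack; infer_instance

-- ===== CLAIM (what is proved, stated in full; the proofs are below) =====
def Claim_equal_second_stack : Prop := ∀ (arr : List Int), Dom_second_stack arr → Spec_second_stack arr (second_stack arr)

-- ===== LEMMAS AND PROOFS =====

-- appending t reversed, for the two-element t A always builds
theorem pv_two_rev_loop (a b c d : Int) :
    List.foldl (fun col j => col ++ [PySem.List.pyGetD [c, d] j 0])
      [a, b] (PySem.List.pyRange ((([c, d] : List Int).length : Int) - 1) (-1) (-1)) = [a, b, d, c] := by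
  have hl : ((([c, d] : List Int).length : Int) - 1) = 1 := by simp
  rw [hl]
  have h2 : PySem.List.pyRange (1 : Int) (-1) (-1) = [1, 0] := by decide
  rw [h2]
  simp [PySem.List.pyGetD, PySem.List.pyGet?, PySem.List.pyIdx?]

theorem second_stack_eq_alt (arr : List Int) : second_stack arr = second_stack_alt arr := by
  have hL2 : PySem.Int.floordiv (arr.length : Int) 2 = ((arr.length / 2 : Nat) : Int) := by
    exact_mod_cast PySem.Int.floordiv_natCast arr.length 2
  have hL4 : PySem.Int.floordiv (arr.length : Int) 4 = ((arr.length / 4 : Nat) : Int) := by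
    exact_mod_cast PySem.Int.floordiv_natCast arr.length 4
  simp only [second_stack, second_stack_alt, hL2, hL4, PySem.List.pyRange_zero_natCast]
  set L := arr.length with hL
  set h := L / 2 with hh
  set q := L / 4 with hq
  rw [PySem.List.foldl_append_singleton_eq_map
    (fun i : Int => [PySem.List.pyGetD arr ((h : Int) + i) 0,
                     PySem.List.pyGetD arr ((h : Int) - 1 - i) 0]) _ []]
  rw [List.nil_append, List.map_map]
  rw [PySem.List.foldl_append_singleton_eq_map _ ((List.range q).map Nat.cast) []]
  rw [List.nil_append, List.map_map, List.map_map]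
  refine List.map_congr_left ?_
  intro i hi
  rw [List.mem_range] at hi
  simp only [Function.comp_def]
  have hc1 : ((q : Int) + (i : Int)) = ((q + i : Nat) : Int) := by omega
  have hc2 : ((q : Int) - 1 - (i : Int)) = ((q - 1 - i : Nat) : Int) := by omega
  have hb1 : q + i < h := by omega
  have hb2 : q - 1 - i < h := by omega
  rw [hc1, hc2]
  have hget : ∀ (k : Nat), k < h →
      PySem.List.pyGetD
        ((List.range h).map (fun j : Nat =>
          [PySem.List.pyGetD arr ((h : Int) + (j : Int)) 0,
           PySem.List.pyGetD arr ((h : Int) - 1 - (j : Int)) 0])) ((k : Nat) : Int) [] =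
        [PySem.List.pyGetD arr ((h : Int) + (k : Int)) 0,
         PySem.List.pyGetD arr ((h : Int) - 1 - (k : Int)) 0] := by
    intro k hk
    rw [PySem.List.pyGetD_natCast]
    simp [List.getD_eq_getElem?_getD, hk]
  rw [hget _ hb1, hget _ hb2]
  have e1 : (h : Int) + ((q + i : Nat) : Int) = (h : Int) + q + i := by omega
  have e2 : (h : Int) - 1 - ((q + i : Nat) : Int) = (h : Int) - 1 - q - i := by omega
  have e3 : (h : Int) + ((q - 1 - i : Nat) : Int) = (h : Int) + q - 1 - i := by omega
  have e4 : (h : Int) - 1 - ((q - 1 - i : Nat) : Int) = (h : Int) - q + i := by omega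
  rw [e1, e2, e3, e4]
  have hslice : ∀ (a b : Int), PySem.List.slice [a, b] none none = [a, b] := by
    intro a b; simp [PySem.List.slice]
  rw [hslice]
  exact pv_two_rev_loop _ _ _ _

-- ===== VERDICT (by name: the statement is the Claim_ definition above) =====
theorem second_stack_spec : Claim_equal_second_stack := by
  intro arr _
  exact second_stack_eq_alt arr
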